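-- pv_equiv track=rewrite | github.com/schmockerc/AIFinalProject | ChessGame.py | gameToState
-- ===== SOURCE A (Python) =====
-- from typing import List
--
-- def gameToState(ascii_state) -> List[chr]:
--     state = [[]]
--     for pos in list(str(ascii_state)):
--         if pos == '\n':
--             state.append([])
--         elif pos != ' ':
--             state[-1].append(pos)
--     return state
-- ===== SOURCE B (Python) =====
-- def gameToState(ascii_state):
--     return [[c for c in line if c != ' ']
--             for line in str(ascii_state).split('\n')]
-- ===== Notes on version B (the rewrite author's own statement) =====
-- stated objective: idiomatic
-- what changed: Replaces the single char-by-char loop that branches on newline and mutates the last sublist with a split-then-map decomposition: split into lines first, then filter spaces out of each line with a comprehension.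
import Mathlib
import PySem

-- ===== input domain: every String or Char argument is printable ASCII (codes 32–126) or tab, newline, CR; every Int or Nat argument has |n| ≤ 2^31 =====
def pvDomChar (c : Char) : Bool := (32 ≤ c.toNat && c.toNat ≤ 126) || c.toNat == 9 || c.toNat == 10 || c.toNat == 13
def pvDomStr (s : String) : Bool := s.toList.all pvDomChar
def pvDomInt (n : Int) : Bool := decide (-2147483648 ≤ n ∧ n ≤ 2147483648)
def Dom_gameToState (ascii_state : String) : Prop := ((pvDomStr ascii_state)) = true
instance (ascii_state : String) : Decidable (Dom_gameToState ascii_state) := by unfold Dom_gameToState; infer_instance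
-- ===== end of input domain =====

-- B replaces A's single flat loop (branching on '\n', appending to the last row) with an
-- idiomatic split-on-newlines-then-filter-spaces decomposition; same cost, equal on all inputs.

-- ===== PORT A =====
-- state[-1].append(pos) rendered functionally: replace the last row by itself with pos appended
-- (A mutates a local list only; the argument is never mutated).
def gameToStateStep (state : List (List String)) (pos : Char) : List (List String) :=
  if pos = '\n' then state ++ [[]]
  else if pos ≠ ' ' then state.dropLast ++ [state.getLastD [] ++ [String.ofList [pos]]]
  else state

def gameToState (ascii_state : String) : List (List String) :=
  ascii_state.toList.foldl gameToStateStep [[]]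

-- ===== PORT B =====
-- str(ascii_state).split('\n') is PySem.Chars.splitOn on the char list (sep ≠ "");
-- the inner comprehension is filter-then-wrap-each-char-as-a-string.
def gameToState_alt (ascii_state : String) : List (List String) :=
  (PySem.Chars.splitOn ascii_state.toList ['\n']).map
    (fun line => (line.filter (fun c => decide (c ≠ ' '))).map (fun c => String.ofList [c]))

-- ===== PRECONDITION & SPEC =====
def Spec_gameToState (ascii_state : String) (out : List (List String)) : Prop := out = gameToState_alt ascii_state
instance (ascii_state : String) (out : List (List String)) : Decidable (Spec_gameToState ascii_state out) := by unfold Spec_gameToState; infer_instance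

-- ===== CLAIM (what is proved, stated in full; the proofs are below) =====
def Claim_equal_gameToState : Prop := ∀ (ascii_state : String), Dom_gameToState ascii_state → Spec_gameToState ascii_state (gameToState ascii_state)

-- ===== LEMMAS AND PROOFS =====

-- splitting a char list at newlines, written as plain structural recursion
def splitNl : List Char → List (List Char)
  | [] => [[]]
  | c :: t => if c = '\n' then [] :: splitNl t
              else match splitNl t with
                   | [] => [[c]]
                   | h :: t' => (c :: h) :: t'

lemma splitNl_ne_nil (l : List Char) : splitNl l ≠ [] := by
  cases l with
  | nil => simp [splitNl]
  | cons c t =>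
    simp only [splitNl]
    split_ifs
    · simp
    · cases h : splitNl t <;> simp

lemma go_spec (fuel : Nat) (l cur : List Char) (acc : List (List Char))
    (h : l.length ≤ fuel) :
    PySem.Chars.splitOn.go ['\n'] fuel l cur acc =
      acc.reverse ++ (match splitNl l with
                      | [] => [cur.reverse]
                      | h :: t => (cur.reverse ++ h) :: t) := by
  induction fuel generalizing l cur acc with
  | zero =>
    have : l = [] := by cases l <;> simp_all
    subst this
    simp [PySem.Chars.splitOn.go, splitNl]
  | succ f ih =>
    cases l with
    | nil => simp [PySem.Chars.splitOn.go, splitNl]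
    | cons c rest =>
      simp only [List.length_cons, Nat.succ_le_succ_iff] at h
      by_cases hc : c = '\n'
      · subst hc
        rw [show PySem.Chars.splitOn.go ['\n'] (f+1) ('\n' :: rest) cur acc =
              PySem.Chars.splitOn.go ['\n'] f rest [] (cur.reverse :: acc) by
            simp [PySem.Chars.splitOn.go, List.isPrefixOf]]
        rw [ih rest [] (cur.reverse :: acc) h]
        have hne := splitNl_ne_nil rest
        cases hs : splitNl rest with
        | nil => exact absurd hs hne
        | cons h' t' => simp [splitNl, hs]
      · rw [show PySem.Chars.splitOn.go ['\n'] (f+1) (c :: rest) cur acc =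
              PySem.Chars.splitOn.go ['\n'] f rest (c :: cur) acc by
            have hpf : (['\n'].isPrefixOf (c :: rest)) = false := by
              simp [List.isPrefixOf, Ne.symm hc]
            simp [PySem.Chars.splitOn.go, hpf]]
        rw [ih rest (c :: cur) acc h]
        have hne := splitNl_ne_nil rest
        cases hs : splitNl rest with
        | nil => exact absurd hs hne
        | cons h' t' => simp [splitNl, hs, hc]

lemma splitOn_eq_splitNl (l : List Char) :
    PySem.Chars.splitOn l ['\n'] = splitNl l := by
  show PySem.Chars.splitOn.go ['\n'] (l.length + 1) l [] [] = splitNl l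
  rw [go_spec (l.length + 1) l [] [] (by omega)]
  have hne := splitNl_ne_nil l
  cases hs : splitNl l with
  | nil => exact absurd hs hne
  | cons h t => simp

-- the row transformer of B
def rowF (line : List Char) : List String :=
  (line.filter (fun c => decide (c ≠ ' '))).map (fun c => String.ofList [c])

lemma foldl_step_spec (l : List Char) (pre : List (List String)) (r : List String) :
    List.foldl gameToStateStep (pre ++ [r]) l =
      pre ++ (match (splitNl l).map rowF with
              | [] => [r]
              | h :: t => (r ++ h) :: t) := by
  induction l generalizing pre r with
  | nil => simp [splitNl, rowF]
  | cons c t ih =>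
    have hne := splitNl_ne_nil t
    cases hs : splitNl t with
    | nil => exact absurd hs hne
    | cons h' t' =>
      by_cases hc : c = '\n'
      · subst hc
        simp only [List.foldl_cons, gameToStateStep]
        simp only [if_true]
        rw [ih (pre ++ [r]) []]
        simp [splitNl, hs, rowF]
      · by_cases hsp : c = ' '
        · subst hsp
          simp only [List.foldl_cons, gameToStateStep]
          rw [if_neg (by decide), if_neg (by simp)]
          rw [ih pre r]
          simp [splitNl, hs, rowF]
        · simp only [List.foldl_cons, gameToStateStep, if_neg hc, if_pos (by simpa using hsp)]
          rw [List.dropLast_concat, List.getLastD_concat]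
          rw [ih pre (r ++ [String.ofList [c]])]
          simp [splitNl, hs, hc, rowF, hsp]

theorem gameToState_eq (s : String) : gameToState s = gameToState_alt s := by
  unfold gameToState gameToState_alt
  rw [splitOn_eq_splitNl]
  have := foldl_step_spec s.toList [] []
  simp only [List.nil_append] at this
  rw [this]
  have hne := splitNl_ne_nil s.toList
  cases hs : splitNl s.toList with
  | nil => exact absurd hs hne
  | cons h t => simp [rowF]

-- ===== VERDICT (by name: the statement is the Claim_ definition above) =====
theorem gameToState_spec : Claim_equal_gameToState := by
  intro s _
  unfold Spec_gameToState
  exact gameToState_eq s
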